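-- pv_equiv track=rewrite | github.com/TiesWestendorp/mathematical-optimization-workshop | cutting-stock/solution1.py | patterns
-- ===== SOURCE A (Python) =====
-- from collections.abc import Iterator
-- from itertools import product
--
-- def patterns(finals: list[int], raw_length: int) -> Iterator[dict[int,int]]:
--     smallest_final = min(finals)
--     maximum_in_raw_per_final = [range(raw_length//final + 1) for final in finals]
--
--     for pattern in product(*maximum_in_raw_per_final):
--         zipped = list(zip(finals, pattern)) # zip-objects are iterators, but we want to iterate it twice, so we transform it into a list here
--         pattern_length = sum(final * amount for final, amount in zipped)
--         waste = raw_length - pattern_length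
--
--         # The pattern must not exceed the raw_length, and no final must be cuttable from the waste
--         if waste >= 0 and waste <= smallest_final:
--             yield dict(zipped)
-- ===== SOURCE B (Python) =====
-- def patterns(finals, raw_length):
--     # DFS over the finals with a running remaining-length bound, pruning counts
--     # that cannot fit; same lexicographic yield order as the full product scan.
--     smallest_final = min(finals)
--     if smallest_final < 0:
--         return  # 0 <= waste <= smallest_final is unsatisfiable: no pattern can qualify
--     def dfs(i, remaining, acc):
--         if i == len(finals):
--             if 0 <= remaining <= smallest_final:
--                 yield dict(acc)
--             return
--         final = finals[i]
--         for amount in range(remaining // final + 1):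
--             yield from dfs(i + 1, remaining - amount * final, acc + [(final, amount)])
--     yield from dfs(0, raw_length, [])
-- ===== Notes on version B (the rewrite author's own statement) =====
-- stated objective: alternative
-- what changed: Replaces the full Cartesian-product scan over all count tuples (bounded only by raw_length//final per piece) with a DFS/backtracking enumeration that threads the remaining length, caps each level's count by remaining//final, and exits early when min(finals) < 0, yielding the same dicts in the same lexicographic order.
import Mathlib
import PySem

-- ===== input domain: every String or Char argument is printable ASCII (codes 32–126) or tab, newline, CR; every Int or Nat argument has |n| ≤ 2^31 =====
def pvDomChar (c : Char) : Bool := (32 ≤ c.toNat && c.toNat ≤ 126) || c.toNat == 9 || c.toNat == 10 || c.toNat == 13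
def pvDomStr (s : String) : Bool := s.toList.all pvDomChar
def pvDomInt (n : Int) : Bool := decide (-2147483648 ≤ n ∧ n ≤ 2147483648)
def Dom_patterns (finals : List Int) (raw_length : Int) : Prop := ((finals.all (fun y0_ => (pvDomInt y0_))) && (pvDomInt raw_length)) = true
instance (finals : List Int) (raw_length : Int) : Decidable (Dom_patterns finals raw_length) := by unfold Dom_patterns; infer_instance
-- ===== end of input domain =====

-- B replaces A's full Cartesian-product scan with a pruned DFS over the finals
-- threading the remaining length (same dicts, same lexicographic order).
-- A is a generator; following the type convention its yields are collected into a list,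
-- and each yielded dict is an insertion-ordered association list.

-- ===== PORT A =====
-- itertools.product over a list of ranges (first factor varies slowest), as lists
def pvProduct : List (List Int) → List (List Int)
  | [] => [[]]
  | r :: rs => let rest := pvProduct rs
               r.flatMap (fun x => rest.map (x :: ·))

def patterns (finals : List Int) (raw_length : Int) : List (List (Int × Int)) :=
  match PySem.List.min? finals (fun x => x) with
  | none => []   -- Python: min([]) raises ValueError; excluded by Pre_
  | some smallest_final =>
    let maximum_in_raw_per_final :=
      finals.map (fun final => PySem.List.pyRange 0 (PySem.Int.floordiv raw_length final + 1) 1)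
    (pvProduct maximum_in_raw_per_final).filterMap (fun pattern =>
      let zipped := finals.zip pattern
      let pattern_length := (zipped.map (fun p => p.1 * p.2)).sum
      let waste := raw_length - pattern_length
      if 0 ≤ waste ∧ waste ≤ smallest_final
      then some (PySem.Dict.ofList zipped).items else none)

-- ===== PORT B =====
-- Source B's dfs(i, remaining, acc): structural recursion on the remaining finals
def pvDfs (smallest_final : Int) : List Int → Int → List (Int × Int) → List (List (Int × Int))
  | [], remaining, acc =>
      if 0 ≤ remaining ∧ remaining ≤ smallest_final
      then [(PySem.Dict.ofList acc).items] else []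
  | final :: rest, remaining, acc =>
      (PySem.List.pyRange 0 (PySem.Int.floordiv remaining final + 1) 1).flatMap
        (fun amount => pvDfs smallest_final rest (remaining - amount * final) (acc ++ [(final, amount)]))

def patterns_alt (finals : List Int) (raw_length : Int) : List (List (Int × Int)) :=
  match PySem.List.min? finals (fun x => x) with
  | none => []   -- min([]) raises in Source B too; excluded by Pre_
  | some smallest_final =>
    if smallest_final < 0 then []   -- no waste can satisfy 0 ≤ waste ≤ smallest_final
    else pvDfs smallest_final finals raw_length []

-- ===== PRECONDITION & SPEC =====
-- A raises ValueError on finals = [] (min) and ZeroDivisionError when 0 ∈ finals (raw_length//final)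
def Pre_patterns (finals : List Int) (raw_length : Int) : Prop :=
  finals ≠ [] ∧ (0 : Int) ∉ finals

instance (finals : List Int) (raw_length : Int) : Decidable (Pre_patterns finals raw_length) := by
  unfold Pre_patterns; infer_instance

def pvWitness_patterns : List Int × Int := ([3, 5], 10)

def Spec_patterns (finals : List Int) (raw_length : Int) (out : List (List (Int × Int))) : Prop :=
  out = patterns_alt finals raw_length

instance (finals : List Int) (raw_length : Int) (out : List (List (Int × Int))) : Decidable (Spec_patterns finals raw_length out) := by
  unfold Spec_patterns; infer_instance

-- ===== CLAIM (what is proved, stated in full; the proofs are below) =====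
def Claim_equal_patterns : Prop := ∀ (finals : List Int) (raw_length : Int), Dom_patterns finals raw_length → Pre_patterns finals raw_length → Spec_patterns finals raw_length (patterns finals raw_length)

-- ===== LEMMAS AND PROOFS =====

def pvCost (z : List (Int × Int)) : Int := (z.map (fun p => p.1 * p.2)).sum

def pvRng (n f : Int) : List Int := PySem.List.pyRange 0 (PySem.Int.floordiv n f + 1) 1

-- A's loop, generalized over a running remaining length and an accumulated prefix
def pvAfold (s raw : Int) (fs : List Int) (remaining : Int) (acc : List (Int × Int)) : List (List (Int × Int)) :=
  (pvProduct (fs.map (fun f => pvRng raw f))).filterMap (fun pat =>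
    let z := fs.zip pat
    if 0 ≤ remaining - pvCost z ∧ remaining - pvCost z ≤ s
    then some (PySem.Dict.ofList (acc ++ z)).items else none)

theorem patterns_eq_afold (finals : List Int) (raw : Int) (s : Int)
    (h : PySem.List.min? finals (fun x => x) = some s) :
    patterns finals raw = pvAfold s raw finals raw [] := by
  simp only [patterns, h, pvAfold, pvCost, pvRng, List.nil_append]

theorem afold_nil_of_neg (s raw : Int) (fs : List Int) (remaining : Int) (acc : List (Int × Int))
    (hs : s < 0) : pvAfold s raw fs remaining acc = [] := by
  rw [pvAfold, List.filterMap_eq_nil_iff]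
  intro pat _
  simp only
  split
  · omega
  · rfl

theorem mem_product_nonneg (raw : Int) (fs : List Int) (pat : List Int)
    (hmem : pat ∈ pvProduct (fs.map (fun f => pvRng raw f))) : ∀ c ∈ pat, 0 ≤ c := by
  induction fs generalizing pat with
  | nil =>
    simp only [List.map_nil, pvProduct, List.mem_singleton] at hmem
    subst hmem; intro c hc; cases hc
  | cons f rest ih =>
    simp only [List.map_cons, pvProduct, List.mem_flatMap, List.mem_map] at hmem
    obtain ⟨c, hc, pat', hpat', rfl⟩ := hmem
    have hc0 : 0 ≤ c := by
      rw [pvRng, PySem.List.mem_pyRange_one] at hc; exact hc.1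
    intro x hx
    rcases List.mem_cons.mp hx with rfl | hx
    · exact hc0
    · exact ih pat' hpat' x hx

theorem cost_nonneg (fs pat : List Int) (hf : ∀ f ∈ fs, 0 < f) (hp : ∀ c ∈ pat, 0 ≤ c) :
    0 ≤ pvCost (fs.zip pat) := by
  induction fs generalizing pat with
  | nil => simp [pvCost]
  | cons f rest ih =>
    cases pat with
    | nil => simp [pvCost]
    | cons c pat' =>
      have h1 : 0 < f := hf f List.mem_cons_self
      have h2 : 0 ≤ c := hp c List.mem_cons_self
      have h3 := ih pat' (fun g hg => hf g (List.mem_cons_of_mem _ hg)) (fun x hx => hp x (List.mem_cons_of_mem _ hx))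
      simp only [List.zip_cons_cons, pvCost, List.map_cons, List.sum_cons] at h3 ⊢
      nlinarith

theorem afold_nil_of_neg_remaining (s raw : Int) (fs : List Int) (remaining : Int) (acc : List (Int × Int))
    (hf : ∀ f ∈ fs, 0 < f) (hrem : remaining < 0) : pvAfold s raw fs remaining acc = [] := by
  rw [pvAfold, List.filterMap_eq_nil_iff]
  intro pat hpat
  have h0 : 0 ≤ pvCost (fs.zip pat) :=
    cost_nonneg fs pat hf (mem_product_nonneg raw fs pat hpat)
  simp only
  split
  · omega
  · rfl

theorem afold_cons (s raw : Int) (f : Int) (rest : List Int) (remaining : Int) (acc : List (Int × Int)) :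
    pvAfold s raw (f :: rest) remaining acc =
      (pvRng raw f).flatMap (fun c => pvAfold s raw rest (remaining - c * f) (acc ++ [(f, c)])) := by
  simp only [pvAfold, List.map_cons, pvProduct, List.filterMap_flatMap, List.filterMap_map]
  apply List.flatMap_congr
  intro c _
  apply List.filterMap_congr
  intro pat _
  simp only [Function.comp_apply, List.zip_cons_cons, pvCost, List.map_cons, List.sum_cons,
    List.append_assoc, List.singleton_append]
  have harith : remaining - (f * c + (List.map (fun p => p.1 * p.2) (rest.zip pat)).sum)
      = remaining - c * f - (List.map (fun p => p.1 * p.2) (rest.zip pat)).sum := by ring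
  rw [harith]

theorem floordiv_neg_of_neg (remaining f : Int) (hf : 0 < f) (h : remaining < 0) :
    PySem.Int.floordiv remaining f < 0 := by
  rw [PySem.Int.floordiv_lt_iff_lt_mul hf]
  omega

theorem afold_eq_dfs (s raw : Int) (fs : List Int) (remaining : Int) (acc : List (Int × Int))
    (hf : ∀ f ∈ fs, 0 < f) (hrem : remaining ≤ raw) :
    pvAfold s raw fs remaining acc = pvDfs s fs remaining acc := by
  induction fs generalizing remaining acc with
  | nil =>
    by_cases hc : 0 ≤ remaining ∧ remaining ≤ s <;>
      simp [pvAfold, pvProduct, pvCost, pvDfs, hc]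
  | cons f rest ih =>
    have hfpos : 0 < f := hf f List.mem_cons_self
    have hfrest : ∀ g ∈ rest, 0 < g := fun g hg => hf g (List.mem_cons_of_mem _ hg)
    rw [afold_cons, pvDfs]
    by_cases hr : remaining < 0
    · -- both sides empty: every branch has negative remaining length
      have hrng : PySem.List.pyRange 0 (PySem.Int.floordiv remaining f + 1) 1 = [] := by
        apply PySem.List.pyRange_one_eq_nil
        have := floordiv_neg_of_neg remaining f hfpos hr
        omega
      rw [hrng, List.flatMap_nil, List.flatMap_eq_nil_iff]
      intro c hc
      rw [pvRng, PySem.List.mem_pyRange_one] at hc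
      apply afold_nil_of_neg_remaining _ _ _ _ _ hfrest
      nlinarith [hc.1]
    · rw [not_lt] at hr
      -- split A's static range at B's pruned bound
      have hm0 : 0 ≤ PySem.Int.floordiv remaining f := by
        rw [PySem.Int.le_floordiv_iff_mul_le hfpos]; omega
      have hmono : PySem.Int.floordiv remaining f ≤ PySem.Int.floordiv raw f := by
        rw [PySem.Int.le_floordiv_iff_mul_le hfpos]
        have h1 := PySem.Int.floordiv_mul_add_mod remaining f
        have h2 := PySem.Int.mod_nonneg remaining hfpos
        omega
      rw [pvRng, PySem.List.pyRange_one_append 0 (PySem.Int.floordiv remaining f + 1)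
        (PySem.Int.floordiv raw f + 1) (by omega) (by omega), List.flatMap_append]
      have htail : (PySem.List.pyRange (PySem.Int.floordiv remaining f + 1) (PySem.Int.floordiv raw f + 1) 1).flatMap
          (fun c => pvAfold s raw rest (remaining - c * f) (acc ++ [(f, c)])) = [] := by
        rw [List.flatMap_eq_nil_iff]
        intro c hc
        rw [PySem.List.mem_pyRange_one] at hc
        apply afold_nil_of_neg_remaining _ _ _ _ _ hfrest
        have hlt : PySem.Int.floordiv remaining f < c := by omega
        have h2 : remaining < c * f := (PySem.Int.floordiv_lt_iff_lt_mul hfpos).mp hlt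
        omega
      rw [htail, List.append_nil]
      apply List.flatMap_congr
      intro c hc
      rw [PySem.List.mem_pyRange_one] at hc
      exact ih _ _ hfrest (by nlinarith [hc.1, hfpos])

-- ===== VERDICT (by name: the statement is the Claim_ definition above) =====
theorem patterns_spec : Claim_equal_patterns := by
  intro finals raw _hdom hpre
  unfold Spec_patterns
  obtain ⟨hne, hz⟩ := hpre
  cases h : PySem.List.min? finals (fun x => x) with
  | none =>
    exact absurd ((PySem.List.min?_eq_none_iff finals (fun x => x)).mp h) hne
  | some s =>
    have hsmem : s ∈ finals := PySem.List.min?_mem h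
    have hsmin : ∀ y ∈ finals, s ≤ y := PySem.List.min?_isMin h
    rw [patterns_eq_afold finals raw s h]
    simp only [patterns_alt, h]
    by_cases hs : s < 0
    · rw [afold_nil_of_neg _ _ _ _ _ hs, if_pos hs]
    · rw [if_neg hs]
      have hspos : 0 < s := by
        rcases lt_or_eq_of_le (not_lt.mp hs) with h' | h'
        · exact h'
        · exact absurd (h' ▸ hsmem) hz
      exact afold_eq_dfs s raw finals raw []
        (fun g hg => lt_of_lt_of_le hspos (hsmin g hg)) le_rfl
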